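-- pv_equiv track=rewrite | github.com/ctlewitt/PracticeProblems | substr_w_concat.py | contains_all_words
-- ===== SOURCE A (Python) =====
-- def contains_all_words(words, word_dict):
--     copy_word_dict = dict(word_dict)
--     for word in words:
--         try:
--             copy_word_dict[word] -= 1
--         except KeyError:
--             return False
--     for word in words:
--         if copy_word_dict.get(word) != 0:
--             return False
--     return True
--
-- words = ["word","good","best","good"]
-- ===== SOURCE B (Python) =====
-- def contains_all_words(words, word_dict):
--     counts = {}
--     for word in words:
--         counts[word] = counts.get(word, 0) + 1
--     for word, c in counts.items():
--         if word_dict.get(word) != c: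
--             return False
--     return True
-- ===== Notes on version B (the rewrite author's own statement) =====
-- stated objective: idiomatic
-- what changed: B builds a frequency table of words in one pass and compares each distinct word's count against word_dict.get once, instead of copying the dict, decrementing per occurrence, and re-scanning all words to verify zeros.
import Mathlib
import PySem

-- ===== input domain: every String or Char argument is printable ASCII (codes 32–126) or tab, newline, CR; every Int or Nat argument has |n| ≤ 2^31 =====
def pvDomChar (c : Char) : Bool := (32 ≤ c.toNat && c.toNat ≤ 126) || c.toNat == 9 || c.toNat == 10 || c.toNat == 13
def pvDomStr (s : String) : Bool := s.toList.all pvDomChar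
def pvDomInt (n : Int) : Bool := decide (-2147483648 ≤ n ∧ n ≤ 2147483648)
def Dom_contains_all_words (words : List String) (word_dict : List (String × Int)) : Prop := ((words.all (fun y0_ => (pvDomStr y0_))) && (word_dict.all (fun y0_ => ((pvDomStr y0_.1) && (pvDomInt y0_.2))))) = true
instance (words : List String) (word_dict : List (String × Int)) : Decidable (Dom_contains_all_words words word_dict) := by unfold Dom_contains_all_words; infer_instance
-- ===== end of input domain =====

-- B builds a word-frequency table in one pass and checks each distinct word's count against the dict,
-- instead of copying the dict, decrementing per occurrence, and re-scanning all words (idiomatic rewrite).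


-- ===== PORT A =====
-- first loop: 'for word in words: try: copy_word_dict[word] -= 1 except KeyError: return False'
-- (none = the early 'return False')
def cawDecLoop (ws : List String) (d : PySem.Dict String Int) : Option (PySem.Dict String Int) :=
  match ws with
  | [] => some d
  | w :: rest =>
    match d.get? w with
    | none => none
    | some v => cawDecLoop rest (d.insert w (v - 1))

-- second loop: 'for word in words: if copy_word_dict.get(word) != 0: return False'
def cawZeroLoop (ws : List String) (d : PySem.Dict String Int) : Bool :=
  match ws with
  | [] => true
  | w :: rest => if d.get? w == some 0 then cawZeroLoop rest d else false

def contains_all_words (words : List String) (word_dict : List (String × Int)) : Bool :=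
  match cawDecLoop words (PySem.Dict.ofList word_dict) with
  | none => false
  | some d => cawZeroLoop words d

-- ===== PORT B =====
-- 'for word, c in counts.items(): if word_dict.get(word) != c: return False'
def cawCheckLoop (items : List (String × Int)) (wd : PySem.Dict String Int) : Bool :=
  match items with
  | [] => true
  | (w, c) :: rest => if wd.get? w == some c then cawCheckLoop rest wd else false

def contains_all_words_alt (words : List String) (word_dict : List (String × Int)) : Bool :=
  let counts := words.foldl (fun d w => d.insert w (d.getD w 0 + 1)) PySem.Dict.empty
  cawCheckLoop counts.items (PySem.Dict.ofList word_dict)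

-- ===== PRECONDITION & SPEC =====
def Spec_contains_all_words (words : List String) (word_dict : List (String × Int)) (out : Bool) : Prop := out = contains_all_words_alt words word_dict
instance (words : List String) (word_dict : List (String × Int)) (out : Bool) : Decidable (Spec_contains_all_words words word_dict out) := by unfold Spec_contains_all_words; infer_instance

-- ===== CLAIM (what is proved, stated in full; the proofs are below) =====
def Claim_equal_contains_all_words : Prop := ∀ (words : List String) (word_dict : List (String × Int)), Dom_contains_all_words words word_dict → Spec_contains_all_words words word_dict (contains_all_words words word_dict)

-- ===== LEMMAS AND PROOFS =====

-- the decrement loop succeeds iff every word is a key; then each key's value dropped by its count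
theorem cawDecLoop_eq_none_iff (ws : List String) (d : PySem.Dict String Int) :
    cawDecLoop ws d = none ↔ ∃ w ∈ ws, d.get? w = none := by
  induction ws generalizing d with
  | nil => simp [cawDecLoop]
  | cons w rest ih =>
    simp only [cawDecLoop]
    cases hw : d.get? w with
    | none => simp [hw]
    | some v =>
      rw [ih]
      constructor
      · rintro ⟨k, hk, hnone⟩
        by_cases hkw : k = w
        · subst hkw; rw [PySem.Dict.get?_insert_self] at hnone; exact absurd hnone (by simp)
        · rw [PySem.Dict.get?_insert_of_ne _ _ hkw] at hnone
          exact ⟨k, List.mem_cons_of_mem _ hk, hnone⟩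
      · rintro ⟨k, hk, hnone⟩
        rcases List.mem_cons.mp hk with hkw | hkr
        · subst hkw; rw [hw] at hnone; exact absurd hnone (by simp)
        · by_cases hkw : k = w
          · subst hkw; rw [hw] at hnone; exact absurd hnone (by simp)
          · exact ⟨k, hkr, by rw [PySem.Dict.get?_insert_of_ne _ _ hkw]; exact hnone⟩

theorem cawDecLoop_get? (ws : List String) (d d' : PySem.Dict String Int)
    (h : cawDecLoop ws d = some d') (k : String) :
    d'.get? k = (d.get? k).map (fun v => v - (ws.count k : Int)) := by
  induction ws generalizing d with
  | nil => simp [cawDecLoop] at h; subst h; simp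
  | cons w rest ih =>
    simp only [cawDecLoop] at h
    cases hw : d.get? w with
    | none => rw [hw] at h; exact absurd h (by simp)
    | some v =>
      rw [hw] at h
      have := ih _ h
      by_cases hkw : k = w
      · subst hkw
        rw [PySem.Dict.get?_insert_self] at this
        rw [this, hw]
        simp
        ring
      · rw [PySem.Dict.get?_insert_of_ne _ _ hkw] at this
        rw [this, List.count_cons]
        simp [Ne.symm hkw]

theorem cawZeroLoop_eq_all (ws : List String) (d : PySem.Dict String Int) :
    cawZeroLoop ws d = ws.all (fun w => d.get? w == some 0) := by
  induction ws with
  | nil => rfl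
  | cons w rest ih => simp only [cawZeroLoop, List.all_cons]; split_ifs with h <;> simp_all

theorem cawCheckLoop_eq_all (items : List (String × Int)) (wd : PySem.Dict String Int) :
    cawCheckLoop items wd = items.all (fun p => wd.get? p.1 == some p.2) := by
  induction items with
  | nil => rfl
  | cons p rest ih =>
    obtain ⟨w, c⟩ := p
    simp only [cawCheckLoop, List.all_cons]; split_ifs with h <;> simp_all

-- B said as a predicate over the distinct words of 'words'
theorem alt_eq_all (words : List String) (word_dict : List (String × Int)) :
    contains_all_words_alt words word_dict =
      (PySem.Set.ofList words).all
        (fun w => (PySem.Dict.ofList word_dict).get? w == some (words.count w : Int)) := by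
  unfold contains_all_words_alt
  rw [PySem.Dict.foldl_insert_getD_add_one_eq_counter]
  show cawCheckLoop (PySem.Dict.counter words).items (PySem.Dict.ofList word_dict) = _
  rw [PySem.Dict.items_counter, cawCheckLoop_eq_all, List.all_map]
  rfl

theorem contains_all_words_spec : Claim_equal_contains_all_words := by
  intro words word_dict _
  unfold Spec_contains_all_words
  rw [alt_eq_all]
  cases h : cawDecLoop words (PySem.Dict.ofList word_dict) with
  | none =>
    simp only [contains_all_words, h]
    rcases (cawDecLoop_eq_none_iff words (PySem.Dict.ofList word_dict)).mp h with ⟨w, hw, hnone⟩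
    symm
    rw [List.all_eq_false]
    exact ⟨w, (PySem.Set.mem_ofList words w).mpr hw, by simp [hnone]⟩
  | some d' =>
    simp only [contains_all_words, h]
    rw [cawZeroLoop_eq_all]
    have hpt : ∀ w ∈ words, (d'.get? w == some (0 : Int)) =
        ((PySem.Dict.ofList word_dict).get? w == some (words.count w : Int)) := by
      intro w hw
      have hd := cawDecLoop_get? words (PySem.Dict.ofList word_dict) d' h w
      cases hg : (PySem.Dict.ofList word_dict).get? w with
      | none => rw [hg] at hd; simp at hd; simp [hd]
      | some v =>
        rw [hg] at hd; simp at hd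
        rw [hd, Bool.eq_iff_iff]
        simp
        omega
    rw [Bool.eq_iff_iff, List.all_eq_true, List.all_eq_true]
    constructor
    · intro hall w hw
      have hwm := (PySem.Set.mem_ofList words w).mp hw
      rw [← hpt w hwm]
      exact hall w hwm
    · intro hall w hw
      rw [hpt w hw]
      exact hall w ((PySem.Set.mem_ofList words w).mpr hw)
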